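-- pv_equiv track=rewrite | github.com/sadeshmukh/ciphered-pattern-api | main.py | validate_partial_word
-- ===== SOURCE A (Python) =====
-- def validate_partial_word(partial: str) -> bool:
--     if not partial or len(partial) > 20:
--         return False
--
--     if not all(c.isalpha() or c == '_' for c in partial):
--         return False
--
--     if all(c == '_' for c in partial):
--         return False
--
--     return True
-- ===== SOURCE B (Python) =====
-- def validate_partial_word(partial: str) -> bool:
--     if not 0 < len(partial) <= 20:
--         return False
--     letters = partial.replace('_', '')
--     return bool(letters) and letters.isalpha()
-- ===== Notes on version B (the rewrite author's own statement) =====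
-- stated objective: idiomatic
-- what changed: Instead of A's two all(...) character scans, B deletes every underscore with str.replace and then decides validity with a single built-in letters.isalpha() test on the residue (nonempty residue = not all underscores; residue all-alpha = every original char was a letter or underscore).
import Mathlib
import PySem

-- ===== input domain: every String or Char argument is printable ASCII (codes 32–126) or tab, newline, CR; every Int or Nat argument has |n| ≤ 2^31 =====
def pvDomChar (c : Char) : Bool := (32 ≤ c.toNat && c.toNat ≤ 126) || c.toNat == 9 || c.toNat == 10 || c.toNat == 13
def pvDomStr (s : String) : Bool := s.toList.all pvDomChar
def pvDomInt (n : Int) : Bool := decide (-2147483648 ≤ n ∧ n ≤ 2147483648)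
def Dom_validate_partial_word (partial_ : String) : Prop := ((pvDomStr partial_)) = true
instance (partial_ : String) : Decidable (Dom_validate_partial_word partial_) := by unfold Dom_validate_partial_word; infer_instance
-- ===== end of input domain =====

-- B replaces A's two all(...) character scans by deleting underscores with str.replace and testing the residue with the built-in isalpha (same cost, idiomatic).
-- ===== PORT A =====
def validate_partial_word (partial_ : String) : Bool :=
  if partial_.toList.isEmpty || PySem.Str.len partial_ > 20 then false
  else if !(partial_.toList.all (fun c => PySem.Chars.isalpha c || c == '_')) then false
  else if partial_.toList.all (fun c => c == '_') then false
  else true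

-- ===== PORT B =====
def validate_partial_word_alt (partial_ : String) : Bool :=
  if !(0 < PySem.Str.len partial_ && PySem.Str.len partial_ ≤ 20) then false
  else
    let letters := PySem.Str.replace partial_ "_" ""
    !letters.toList.isEmpty && PySem.Str.strIsalpha letters

-- ===== PRECONDITION & SPEC =====
def Spec_validate_partial_word (partial_ : String) (out : Bool) : Prop := out = validate_partial_word_alt partial_
instance (partial_ : String) (out : Bool) : Decidable (Spec_validate_partial_word partial_ out) := by unfold Spec_validate_partial_word; infer_instance

-- ===== CLAIM =====
def Claim_equal_validate_partial_word : Prop := ∀ (partial_ : String), Dom_validate_partial_word partial_ → Spec_validate_partial_word partial_ (validate_partial_word partial_)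

-- ===== LEMMAS AND PROOFS =====

-- replace with the one-char pattern '_' and empty replacement is underscore-removal
lemma replace_go_underscore (l acc : List Char) :
    PySem.Chars.replace.go ['_'] [] l.length l acc
      = acc.reverse ++ l.filter (fun c => !(c == '_')) := by
  induction l generalizing acc with
  | nil => simp [PySem.Chars.replace.go]
  | cons c t ih =>
    by_cases hc : c = '_'
    · subst hc
      simpa [PySem.Chars.replace.go, List.isPrefixOf] using ih acc
    · have hc' : ¬ ('_' = c) := fun h => hc h.symm
      have h1 : (c == '_') = false := by simpa using hc
      simpa [PySem.Chars.replace.go, List.isPrefixOf, hc', h1] using ih (c :: acc)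

lemma replace_underscore (l : List Char) :
    PySem.Chars.replace l ['_'] [] = l.filter (fun c => !(c == '_')) := by
  simpa [PySem.Chars.replace] using replace_go_underscore l []

-- the residue is empty exactly when every char is '_'
lemma filter_isEmpty_eq_all (l : List Char) :
    (l.filter (fun c => !(c == '_'))).isEmpty = l.all (fun c => c == '_') := by
  induction l with
  | nil => simp
  | cons c t ih =>
    by_cases hc : c = '_'
    · subst hc; simpa using ih
    · have h1 : (c == '_') = false := by simpa using hc
      simp [h1]

-- the residue is all-alpha exactly when every char is a letter or '_'
lemma filter_all_alpha (l : List Char) :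
    (l.filter (fun c => !(c == '_'))).all PySem.Chars.isalpha
      = l.all (fun c => PySem.Chars.isalpha c || c == '_') := by
  induction l with
  | nil => simp
  | cons c t ih =>
    by_cases hc : c = '_'
    · subst hc; simpa using ih
    · have h1 : (c == '_') = false := by simpa using hc
      simp [h1, ih]

-- list-level statement of the whole equivalence
lemma main_list (l : List Char) :
    (if l.isEmpty || (l.length : Int) > 20 then false
     else if !(l.all (fun c => PySem.Chars.isalpha c || c == '_')) then false
     else if l.all (fun c => c == '_') then false
     else true)
      = (if !(0 < (l.length : Int) && (l.length : Int) ≤ 20) then false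
         else !(PySem.Chars.replace l ['_'] []).isEmpty
                && PySem.Chars.strIsalpha (PySem.Chars.replace l ['_'] [])) := by
  rw [replace_underscore]
  by_cases h20 : l.length ≤ 20
  · by_cases hnil : l = []
    · subst hnil; simp
    · have hlen : 0 < l.length := List.length_pos_iff.mpr hnil
      have g1 : (l.isEmpty || decide ((l.length : Int) > 20)) = false := by
        simp [hnil]; exact_mod_cast h20
      have g2 : (!(decide (0 < (l.length : Int)) && decide ((l.length : Int) ≤ 20))) = false := by
        simp; constructor
        · exact_mod_cast hlen
        · exact_mod_cast h20
      rw [show (if l.isEmpty || (l.length : Int) > 20 then false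
            else if !(l.all (fun c => PySem.Chars.isalpha c || c == '_')) then false
            else if l.all (fun c => c == '_') then false else true)
          = (if (l.isEmpty || decide ((l.length : Int) > 20)) = true then false
            else if !(l.all (fun c => PySem.Chars.isalpha c || c == '_')) then false
            else if l.all (fun c => c == '_') then false else true) from rfl]
      rw [g1]
      simp only [Bool.false_eq_true, if_false]
      rw [show (if (!(0 < (l.length : Int) && (l.length : Int) ≤ 20)) = true then false
            else !(l.filter (fun c => !(c == '_'))).isEmpty
                   && PySem.Chars.strIsalpha (l.filter (fun c => !(c == '_'))))
          = (if (!(decide (0 < (l.length : Int)) && decide ((l.length : Int) ≤ 20))) = true then false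
            else !(l.filter (fun c => !(c == '_'))).isEmpty
                   && PySem.Chars.strIsalpha (l.filter (fun c => !(c == '_')))) from rfl]
      rw [g2]
      simp only [Bool.false_eq_true, if_false, PySem.Chars.strIsalpha,
        filter_isEmpty_eq_all, filter_all_alpha]
      by_cases hv : (l.all (fun c => PySem.Chars.isalpha c || c == '_')) = true
      · by_cases hu : (l.all (fun c => c == '_')) = true <;> simp [hv, hu]
      · have hv' : (l.all (fun c => PySem.Chars.isalpha c || c == '_')) = false :=
          Bool.eq_false_iff.mpr hv
        simp [hv']
  · have g1 : ((l.length : Int) > 20) := by exact_mod_cast Nat.lt_of_not_le h20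
    have g2 : ¬ ((l.length : Int) ≤ 20) := by exact_mod_cast h20
    simp [g1, g2]

-- ===== VERDICT =====
theorem validate_partial_word_spec : Claim_equal_validate_partial_word := by
  intro s _
  unfold Spec_validate_partial_word validate_partial_word validate_partial_word_alt
  have hrep : (PySem.Str.replace s "_" "").toList
      = PySem.Chars.replace s.toList ['_'] [] := by
    simp [PySem.Str.replace]
  simp only [PySem.Str.len, PySem.Str.strIsalpha, hrep]
  exact main_list s.toList
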